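-- pv_equiv track=rewrite | github.com/jwubz123/file_transfer | filter_filesystem_tools.py | select_topk_closest_line_pairs
-- ===== SOURCE A (Python) =====
-- from typing import Any, Dict, List, Optional, Set
-- from typing import Any, Dict, List, Optional, Set, Union
--
-- def merge_overlapping_ranges(ranges: List[tuple]) -> List[tuple]:
--     """
--     合并重叠的行号范围
--
--     Args:
--         ranges: 行号范围列表，每个元素是 (start_line, end_line) 元组
--
--     Returns:
--         合并后的范围列表
--
--     Examples:
--         >>> merge_overlapping_ranges([(5, 5), (5, 6), (5, 8)])
--         [(5, 8)]
--         >>> merge_overlapping_ranges([(1, 3), (5, 7), (6, 9)])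
--         [(1, 3), (5, 9)]
--     """
--     if not ranges:
--         return []
--
--     # 按起始行排序
--     sorted_ranges = sorted(ranges, key=lambda x: (x[0], x[1]))
--
--     merged = [sorted_ranges[0]]
--     for current_start, current_end in sorted_ranges[1:]:
--         last_start, last_end = merged[-1]
--
--         # 如果当前范围与上一个范围重叠或相邻，合并它们
--         if current_start <= last_end + 1:
--             merged[-1] = (last_start, max(last_end, current_end))
--         else:
--             # 否则添加新范围
--             merged.append((current_start, current_end))
--
--     return merged
--
-- def select_topk_closest_line_pairs(
--     keyword_group_lines: List[List[int]],
--     topk: int = 8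
-- ) -> List[tuple]:
--     """
--     从不同关键词组匹配的行号中，选择距离最近的top-k个行对
--
--     Args:
--         keyword_group_lines: 每个关键词组匹配的行号列表
--             例如: [[1, 5], [5, 6, 8]] 表示第一组匹配1,5行，第二组匹配5,6,8行
--         topk: 返回距离最近的前k个行对
--
--     Returns:
--         行号范围列表 [(start, end), ...] 已去重合并
--
--     Examples:
--         >>> select_topk_closest_line_pairs([[1, 5], [5, 6, 8]], topk=3)
--         [(5, 8)]  # 距离: (5-5)=0, (6-5)=1, (8-5)=3, 合并后5-8
--     """
--     if len(keyword_group_lines) < 2: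
--         # 如果只有一个关键词组，返回所有匹配行
--         if keyword_group_lines:
--             lines = keyword_group_lines[0]
--             return [(line, line) for line in lines]
--         return []
--
--     # 计算所有可能的行对及其距离
--     # (distance, group_a_line, group_b_line, group_a_idx, group_b_idx)
--     distances = []
--
--     # 对于每对关键词组
--     for i in range(len(keyword_group_lines)):
--         for j in range(i + 1, len(keyword_group_lines)):
--             group_a = keyword_group_lines[i]
--             group_b = keyword_group_lines[j]
--
--             # 计算这两组之间所有行的距离
--             for line_a in group_a:
--                 for line_b in group_b:
--                     distance = abs(line_b - line_a)
--                     min_line = min(line_a, line_b)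
--                     max_line = max(line_a, line_b)
--                     distances.append((distance, min_line, max_line, i, j))
--
--     # 按距离排序
--     distances.sort(key=lambda x: (x[0], x[1], x[2]))
--
--     # 选择前topk个
--     selected_pairs = distances[:topk]
--
--     # 提取行号范围
--     ranges = [(min_line, max_line) for _, min_line, max_line, _, _ in selected_pairs]
--
--     # 合并重叠范围
--     merged_ranges = merge_overlapping_ranges(ranges)
--
--     return merged_ranges
-- ===== SOURCE B (Python) =====
-- def _insert_sorted(t, buf):
--     """Insert t into ascending buf (before the first strictly greater element)."""
--     for idx in range(len(buf)):
--         if t < buf[idx]: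
--             return buf[:idx] + [t] + buf[idx:]
--     return buf + [t]
--
--
-- def select_topk_closest_line_pairs(keyword_group_lines, topk=8):
--     if len(keyword_group_lines) < 2:
--         if keyword_group_lines:
--             return [(line, line) for line in keyword_group_lines[0]]
--         return []
--     # stream all cross-group pairs through a bounded sorted buffer of the
--     # topk smallest (distance, lo, hi) triples -- no global list, no full sort
--     k = topk if topk > 0 else 0
--     buf = []
--     for i in range(len(keyword_group_lines)):
--         group_a = keyword_group_lines[i]
--         for j in range(i + 1, len(keyword_group_lines)):
--             group_b = keyword_group_lines[j]
--             for a in group_a: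
--                 for b in group_b:
--                     t = (b - a, a, b) if a <= b else (a - b, b, a)
--                     if len(buf) < k:
--                         buf = _insert_sorted(t, buf)
--                     elif k > 0 and t < buf[-1]:
--                         buf = _insert_sorted(t, buf)[:-1]
--     ranges = [(lo, hi) for _, lo, hi in buf]
--     # merge overlapping/adjacent ranges: fold with the accumulator kept reversed
--     acc = []
--     for s, e in sorted(ranges):
--         if acc and s <= acc[0][1] + 1:
--             ls, le = acc[0]
--             acc[0] = (ls, e if e > le else le)
--         else:
--             acc.insert(0, (s, e))
--     return acc[::-1]
-- ===== Notes on version B (the rewrite author's own statement) =====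
-- stated objective: faster
-- what changed: Instead of materialising all O(G^2 n^2) cross-group distance tuples, sorting them all and slicing, B streams each (distance, lo, hi) triple through a bounded sorted buffer that keeps only the topk smallest (rejecting most elements with one comparison against the buffer's last entry), and merges ranges with a single reversed-accumulator fold.
-- intended difference: For negative topk (with >= 2 groups and more than |topk| cross-group pairs) A's distances[:topk] slice accidentally keeps all but the last |topk| pairs and returns their merged ranges, while B returns the empty list, the intended result of asking for at most a non-positive number of top pairs. — e.g. on select_topk_closest_line_pairs([[0], [2], [5]], -1): A returns [(0, 5)], B returns []
import Mathlib
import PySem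

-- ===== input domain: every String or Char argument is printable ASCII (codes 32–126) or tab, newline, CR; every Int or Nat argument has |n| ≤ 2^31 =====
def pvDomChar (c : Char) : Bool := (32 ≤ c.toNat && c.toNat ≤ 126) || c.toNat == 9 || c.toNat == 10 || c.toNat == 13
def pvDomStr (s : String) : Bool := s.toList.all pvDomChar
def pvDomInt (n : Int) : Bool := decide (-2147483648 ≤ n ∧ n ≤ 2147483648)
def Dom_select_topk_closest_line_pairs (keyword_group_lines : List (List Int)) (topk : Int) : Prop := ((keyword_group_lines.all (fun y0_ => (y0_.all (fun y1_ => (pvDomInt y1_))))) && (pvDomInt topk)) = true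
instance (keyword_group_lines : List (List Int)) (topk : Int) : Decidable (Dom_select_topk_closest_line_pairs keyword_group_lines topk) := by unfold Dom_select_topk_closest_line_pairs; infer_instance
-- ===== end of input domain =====

-- B streams the cross-group (distance, lo, hi) triples through a bounded sorted buffer of the
-- topk smallest instead of building, fully sorting and slicing the whole list (objective: faster).

-- ===== PORT A =====

-- Python tuple '<' on 3-tuples of ints (lexicographic); shared comparison of both ports' keys
def tripLt (a b : Int × Int × Int) : Bool :=
  decide (a.1 < b.1 ∨ (a.1 = b.1 ∧ (a.2.1 < b.2.1 ∨ (a.2.1 = b.2.1 ∧ a.2.2 < b.2.2))))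

-- key=lambda x: (x[0], x[1], x[2]) on A's 5-tuples
def key5 (t : Int × Int × Int × Int × Int) : Int × Int × Int := (t.1, t.2.1, t.2.2.1)

def before5 (a b : Int × Int × Int × Int × Int) : Bool := tripLt (key5 a) (key5 b)

-- helper merge_overlapping_ranges of A
def mergeOverlappingRanges (ranges : List (Int × Int)) : List (Int × Int) :=
  if ranges = [] then []
  else
    -- sorted(ranges, key=lambda x: (x[0], x[1]))
    match PySem.List.sorted2 ranges (fun x => x.1) (fun x => x.2) with
    | [] => []   -- unreachable: sorted of a nonempty list is nonempty
    | first :: rest =>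
        rest.foldl (fun merged cur =>
          let last := merged.getLast?.getD (0, 0)   -- merged[-1]; merged is nonempty throughout, so exact
          if cur.1 ≤ last.2 + 1 then merged.dropLast ++ [(last.1, max last.2 cur.2)]
          else merged ++ [cur]) [first]

def select_topk_closest_line_pairs (keyword_group_lines : List (List Int)) (topk : Int) : List (Int × Int) :=
  if keyword_group_lines.length < 2 then
    match keyword_group_lines with
    | [] => []
    | lines :: _ => lines.map (fun line => (line, line))
  else
    let n : Int := keyword_group_lines.length
    let distances : List (Int × Int × Int × Int × Int) :=
      (PySem.List.pyRange 0 n).foldl (fun acc i =>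
        (PySem.List.pyRange (i + 1) n).foldl (fun acc j =>
          let group_a := PySem.List.pyGetD keyword_group_lines i []   -- i in range: exact
          let group_b := PySem.List.pyGetD keyword_group_lines j []
          group_a.foldl (fun acc line_a =>
            group_b.foldl (fun acc line_b =>
              acc ++ [(|line_b - line_a|, min line_a line_b, max line_a line_b, i, j)]) acc) acc) acc) []
    -- distances.sort(key=lambda x: (x[0], x[1], x[2])): Python's stable sort with a 3-part tuple
    -- key; PySem.List.sorted2 covers 2-part keys — this is the same insertBy construction, exact
    -- because Python tuple comparison is lexicographic (tripLt) and insertBy inserts after equals.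
    let dsorted := distances.foldl (fun acc x => PySem.List.insertBy before5 x acc) []
    let selected := PySem.List.slice dsorted none (some topk)     -- distances[:topk]
    let ranges := selected.map (fun t => (t.2.1, t.2.2.1))
    mergeOverlappingRanges ranges

-- ===== PORT B =====

-- _insert_sorted of Source B (the early-return scan ported as the structural recursion)
def insertSorted (t : Int × Int × Int) : List (Int × Int × Int) → List (Int × Int × Int)
  | [] => [t]
  | b :: rest => if tripLt t b then t :: b :: rest else b :: insertSorted t rest

-- body of Source B's innermost loop: feed one triple into the bounded buffer
def topkStep (k : Nat) (buf : List (Int × Int × Int)) (t : Int × Int × Int) : List (Int × Int × Int) :=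
  if buf.length < k then insertSorted t buf
  else if 0 < k ∧ tripLt t (buf.getLast?.getD (0, 0, 0)) then   -- buf[-1]: buf nonempty here (k ≤ len), exact
    (insertSorted t buf).dropLast                                -- _insert_sorted(t, buf)[:-1]
  else buf

-- Source B's merge loop: fold with the accumulator kept reversed, then reverse
def mergeRangesRev (ranges : List (Int × Int)) : List (Int × Int) :=
  -- sorted(ranges): Python's default tuple order is the (x[0], x[1]) key
  ((PySem.List.sorted2 ranges (fun x => x.1) (fun x => x.2)).foldl (fun acc cur =>
    match acc with
    | [] => [cur]
    | (ls, le) :: tl =>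
        if cur.1 ≤ le + 1 then (ls, if le < cur.2 then cur.2 else le) :: tl
        else cur :: (ls, le) :: tl) []).reverse

def select_topk_closest_line_pairs_alt (keyword_group_lines : List (List Int)) (topk : Int) : List (Int × Int) :=
  if keyword_group_lines.length < 2 then
    match keyword_group_lines with
    | [] => []
    | lines :: _ => lines.map (fun line => (line, line))
  else
    let n : Int := keyword_group_lines.length
    let k : Nat := topk.toNat                      -- k = topk if topk > 0 else 0
    let buf : List (Int × Int × Int) :=
      (PySem.List.pyRange 0 n).foldl (fun buf i =>
        (PySem.List.pyRange (i + 1) n).foldl (fun buf j =>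
          let group_a := PySem.List.pyGetD keyword_group_lines i []   -- i in range: exact
          let group_b := PySem.List.pyGetD keyword_group_lines j []
          group_a.foldl (fun buf a =>
            group_b.foldl (fun buf b =>
              topkStep k buf (if a ≤ b then (b - a, a, b) else (a - b, b, a))) buf) buf) buf) []
    mergeRangesRev (buf.map (fun t => (t.2.1, t.2.2)))

-- ===== PRECONDITION & SPEC =====

-- number of cross-group line pairs, straight off the input's shape
def crossPairCount : List (List Int) → Nat
  | [] => 0
  | h :: t => (t.map (fun gj => h.length * gj.length)).sum + crossPairCount t

-- For negative topk (with ≥ 2 groups and more than |topk| cross-group pairs) A's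
-- distances[:topk] slice accidentally keeps all but the last |topk| pairs and returns their
-- merged ranges, while B returns the empty list, the intended result of asking for at most
-- a non-positive number of top pairs.
def D_select_topk_closest_line_pairs (keyword_group_lines : List (List Int)) (topk : Int) : Prop :=
  topk < 0 ∧ 2 ≤ keyword_group_lines.length ∧ (-topk).toNat < crossPairCount keyword_group_lines

instance (keyword_group_lines : List (List Int)) (topk : Int) : Decidable (D_select_topk_closest_line_pairs keyword_group_lines topk) := by unfold D_select_topk_closest_line_pairs; infer_instance

def Spec_select_topk_closest_line_pairs (keyword_group_lines : List (List Int)) (topk : Int) (out : List (Int × Int)) : Prop := ¬ D_select_topk_closest_line_pairs keyword_group_lines topk → out = select_topk_closest_line_pairs_alt keyword_group_lines topk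
instance (keyword_group_lines : List (List Int)) (topk : Int) (out : List (Int × Int)) : Decidable (Spec_select_topk_closest_line_pairs keyword_group_lines topk out) := by unfold Spec_select_topk_closest_line_pairs; infer_instance

def pvDiffWitness_select_topk_closest_line_pairs : List (List Int) × Int := ([[0], [2], [5]], -1)
def pvDiffWitnessOut_select_topk_closest_line_pairs : (List (Int × Int)) × (List (Int × Int)) := ([(0, 5)], [])

-- ===== CLAIM (what is proved, stated in full; the proofs are below) =====
def Claim_unchanged_select_topk_closest_line_pairs : Prop := ∀ (keyword_group_lines : List (List Int)) (topk : Int), Dom_select_topk_closest_line_pairs keyword_group_lines topk → Spec_select_topk_closest_line_pairs keyword_group_lines topk (select_topk_closest_line_pairs keyword_group_lines topk)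
def Claim_changed_select_topk_closest_line_pairs : Prop := Dom_select_topk_closest_line_pairs (pvDiffWitness_select_topk_closest_line_pairs.1) (pvDiffWitness_select_topk_closest_line_pairs.2) ∧ D_select_topk_closest_line_pairs (pvDiffWitness_select_topk_closest_line_pairs.1) (pvDiffWitness_select_topk_closest_line_pairs.2) ∧ select_topk_closest_line_pairs (pvDiffWitness_select_topk_closest_line_pairs.1) (pvDiffWitness_select_topk_closest_line_pairs.2) = pvDiffWitnessOut_select_topk_closest_line_pairs.1 ∧ select_topk_closest_line_pairs_alt (pvDiffWitness_select_topk_closest_line_pairs.1) (pvDiffWitness_select_topk_closest_line_pairs.2) = pvDiffWitnessOut_select_topk_closest_line_pairs.2 ∧ pvDiffWitnessOut_select_topk_closest_line_pairs.1 ≠ pvDiffWitnessOut_select_topk_closest_line_pairs.2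

def Claim_exact_select_topk_closest_line_pairs : Prop := ∀ (keyword_group_lines : List (List Int)) (topk : Int), Dom_select_topk_closest_line_pairs keyword_group_lines topk → D_select_topk_closest_line_pairs keyword_group_lines topk → select_topk_closest_line_pairs keyword_group_lines topk ≠ select_topk_closest_line_pairs_alt keyword_group_lines topk

-- ===== LEMMAS AND PROOFS =====

-- order of the other port's proofs: x ≤ y as "not tripLt y x"
def tripLe (a b : Int × Int × Int) : Prop := tripLt b a = false

lemma tripLt_asymm {a b : Int × Int × Int} (h : tripLt a b = true) : tripLt b a = false := by
  obtain ⟨a1, a2, a3⟩ := a; obtain ⟨b1, b2, b3⟩ := b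
  simp [tripLt] at *; omega

-- t < b and ¬(y < b)  ⇒  ¬(y < t)
lemma not_lt_left {t b y : Int × Int × Int} (h1 : tripLt t b = true)
    (h2 : tripLt y b = false) : tripLt y t = false := by
  obtain ⟨a1, a2, a3⟩ := t; obtain ⟨b1, b2, b3⟩ := b; obtain ⟨c1, c2, c3⟩ := y
  simp [tripLt] at *; omega

-- ¬(t < y) and ¬(y < b)  ⇒  ¬(t < b)
lemma not_lt_trans {t y b : Int × Int × Int} (h1 : tripLt t y = false)
    (h2 : tripLt y b = false) : tripLt t b = false := by
  obtain ⟨a1, a2, a3⟩ := t; obtain ⟨b1, b2, b3⟩ := y; obtain ⟨c1, c2, c3⟩ := b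
  simp [tripLt] at *; omega

lemma insertSorted_length (t : Int × Int × Int) (l : List (Int × Int × Int)) :
    (insertSorted t l).length = l.length + 1 := by
  induction l with
  | nil => rfl
  | cons b rest ih => simp only [insertSorted]; split <;> simp [ih]

lemma mem_insertSorted {t x : Int × Int × Int} {l : List (Int × Int × Int)}
    (h : x ∈ insertSorted t l) : x = t ∨ x ∈ l := by
  induction l with
  | nil => simpa [insertSorted] using h
  | cons b rest ih =>
      simp only [insertSorted] at h
      split at h
      · simpa using h
      · rcases List.mem_cons.mp h with h' | h'
        · right; exact h' ▸ List.mem_cons_self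
        · rcases ih h' with h'' | h''
          · left; exact h''
          · right; exact List.mem_cons_of_mem _ h''

lemma pairwise_insertSorted {t : Int × Int × Int} {l : List (Int × Int × Int)}
    (h : l.Pairwise tripLe) : (insertSorted t l).Pairwise tripLe := by
  induction l with
  | nil => simp [insertSorted, tripLe]
  | cons b rest ih =>
      rw [List.pairwise_cons] at h
      simp only [insertSorted]
      split
      · rename_i hlt
        refine List.Pairwise.cons ?_ (List.Pairwise.cons h.1 h.2)
        intro y hy
        rcases List.mem_cons.mp hy with hy' | hy'
        · subst hy'; exact tripLt_asymm hlt
        · exact not_lt_left hlt (h.1 y hy')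
      · rename_i hnlt
        refine List.Pairwise.cons ?_ (ih h.2)
        intro y hy
        rcases mem_insertSorted hy with hy' | hy'
        · subst hy'
          exact eq_false_of_ne_true hnlt
        · exact h.1 y hy'

lemma insertSorted_prefix {t : Int × Int × Int} {pre rest : List (Int × Int × Int)}
    (h : ∀ b ∈ pre, tripLt t b = false) :
    insertSorted t (pre ++ rest) = pre ++ insertSorted t rest := by
  induction pre with
  | nil => rfl
  | cons b p ih =>
      have hb := h b List.mem_cons_self
      simp only [List.cons_append, insertSorted, hb, Bool.false_eq_true, if_false]
      rw [ih (fun x hx => h x (List.mem_cons_of_mem _ hx))]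

lemma take_insertSorted_take (t : Int × Int × Int) (s : List (Int × Int × Int)) (k : Nat) :
    (insertSorted t (s.take k)).take k = (insertSorted t s).take k := by
  induction s generalizing k with
  | nil => simp
  | cons a s' ih =>
      cases k with
      | zero => simp
      | succ m =>
          simp only [List.take_succ_cons, insertSorted]
          split
          · simp only [List.take_succ_cons]
            congr 1
            cases m with
            | zero => simp
            | succ p => simp [List.take_take]
          · simp [ih]

def sortOf (L : List (Int × Int × Int)) : List (Int × Int × Int) :=
  L.foldl (fun acc x => insertSorted x acc) []

lemma pairwise_foldl_insert (L : List (Int × Int × Int)) (acc : List (Int × Int × Int))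
    (h : acc.Pairwise tripLe) :
    (L.foldl (fun a x => insertSorted x a) acc).Pairwise tripLe := by
  induction L generalizing acc with
  | nil => exact h
  | cons x L ih => exact ih _ (pairwise_insertSorted h)

lemma sortOf_pairwise (L : List (Int × Int × Int)) : (sortOf L).Pairwise tripLe :=
  pairwise_foldl_insert L [] List.Pairwise.nil

lemma topkStep_take {S : List (Int × Int × Int)} (hS : S.Pairwise tripLe)
    (k : Nat) (t : Int × Int × Int) :
    topkStep k (S.take k) t = (insertSorted t S).take k := by
  unfold topkStep
  by_cases hlen : S.length < k
  · rw [if_pos (by simp only [List.length_take]; omega)]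
    rw [List.take_of_length_le (le_of_lt hlen),
        List.take_of_length_le (by rw [insertSorted_length]; omega)]
  · rw [if_neg (by simp only [List.length_take]; omega)]
    split
    · rename_i hc
      have hlen1 : (insertSorted t (S.take k)).length = k + 1 := by
        rw [insertSorted_length, List.length_take]; omega
      rw [List.dropLast_eq_take, hlen1, Nat.add_sub_cancel]
      exact take_insertSorted_take t S k
    · rename_i hc
      by_cases hk : k = 0
      · subst hk; simp
      · have hk' : 0 < k := Nat.pos_of_ne_zero hk
        have hne : S.take k ≠ [] := by
          intro hnil
          have := congrArg List.length hnil
          simp only [List.length_take, List.length_nil] at this; omega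
        have hlast0 : tripLt t ((S.take k).getLast?.getD (0, 0, 0)) = false := by
          rcases Bool.eq_false_or_eq_true (tripLt t ((S.take k).getLast?.getD (0, 0, 0))) with h | h
          all_goals first | exact h | exact absurd ⟨hk', h⟩ hc
        have hpairL : (S.take k).Pairwise tripLe := hS.sublist (List.take_sublist k S)
        have hlast : tripLt t ((S.take k).getLast hne) = false := by
          rwa [List.getLast?_eq_some_getLast hne, Option.getD_some] at hlast0
        have hall : ∀ b ∈ S.take k, tripLt t b = false := by
          intro b hb
          have hsplit : (S.take k).dropLast ++ [(S.take k).getLast hne] = S.take k :=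
            List.dropLast_concat_getLast hne
          rcases (by rw [← hsplit] at hb; exact List.mem_append.mp hb) with hb' | hb'
          · have hpair := hpairL
            rw [← hsplit, List.pairwise_append] at hpair
            have hble : tripLe b ((S.take k).getLast hne) :=
              hpair.2.2 b hb' _ List.mem_cons_self
            exact not_lt_trans hlast hble
          · rw [List.mem_singleton.mp hb']; exact hlast
        have hins : insertSorted t S = S.take k ++ insertSorted t (S.drop k) := by
          conv_lhs => rw [← List.take_append_drop k S]
          exact insertSorted_prefix hall
        have hLlen : (S.take k).length = k := by simp only [List.length_take]; omega
        rw [hins, List.take_left' hLlen]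

lemma foldl_topkStep (k : Nat) (L : List (Int × Int × Int)) :
    L.foldl (topkStep k) [] = (sortOf L).take k := by
  induction L using List.reverseRecOn with
  | nil => simp [sortOf]
  | append_singleton L x ih =>
      have hs : sortOf (L ++ [x]) = insertSorted x (sortOf L) := by
        rw [sortOf, List.foldl_concat]; rfl
      rw [List.foldl_concat, ih, hs]
      exact topkStep_take (sortOf_pairwise L) k x

-- canonical flatMap forms of the two generation loops
def gen5 (g : List (List Int)) (n : Int) : List (Int × Int × Int × Int × Int) :=
  (PySem.List.pyRange 0 n).flatMap (fun i =>
    (PySem.List.pyRange (i + 1) n).flatMap (fun j =>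
      (PySem.List.pyGetD g i []).flatMap (fun a =>
        (PySem.List.pyGetD g j []).map (fun b => (|b - a|, min a b, max a b, i, j)))))

def gen3 (g : List (List Int)) (n : Int) : List (Int × Int × Int) :=
  (PySem.List.pyRange 0 n).flatMap (fun i =>
    (PySem.List.pyRange (i + 1) n).flatMap (fun j =>
      (PySem.List.pyGetD g i []).flatMap (fun a =>
        (PySem.List.pyGetD g j []).map (fun b =>
          if a ≤ b then ((b - a : Int), a, b) else (a - b, b, a)))))

def sort5 (X : List (Int × Int × Int × Int × Int)) : List (Int × Int × Int × Int × Int) :=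
  X.foldl (fun acc x => PySem.List.insertBy before5 x acc) []

def proj5 (t : Int × Int × Int × Int × Int) : Int × Int := (t.2.1, t.2.2.1)
def proj3 (t : Int × Int × Int) : Int × Int := (t.2.1, t.2.2)

lemma flatten_map_singleton {α β : Type} (l : List α) (f : α → β) :
    (l.map (fun b => [f b])).flatten = l.map f := by
  induction l with
  | nil => rfl
  | cons b l ih => simp [ih]

lemma distances_eq (g : List (List Int)) (n : Int) :
    (PySem.List.pyRange 0 n).foldl (fun acc i =>
      (PySem.List.pyRange (i + 1) n).foldl (fun acc j =>
        let group_a := PySem.List.pyGetD g i []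
        let group_b := PySem.List.pyGetD g j []
        group_a.foldl (fun acc line_a =>
          group_b.foldl (fun acc line_b =>
            acc ++ [(|line_b - line_a|, min line_a line_b, max line_a line_b, i, j)]) acc) acc) acc) []
    = gen5 g n := by
  simp [gen5, List.flatMap_def, flatten_map_singleton]

lemma buf_eq (g : List (List Int)) (n : Int) (k : Nat) :
    (PySem.List.pyRange 0 n).foldl (fun buf i =>
      (PySem.List.pyRange (i + 1) n).foldl (fun buf j =>
        let group_a := PySem.List.pyGetD g i []
        let group_b := PySem.List.pyGetD g j []
        group_a.foldl (fun buf a =>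
          group_b.foldl (fun buf b =>
            topkStep k buf (if a ≤ b then (b - a, a, b) else (a - b, b, a))) buf) buf) buf) []
    = (gen3 g n).foldl (topkStep k) [] := by
  simp [gen3, List.foldl_flatMap, List.foldl_map]

lemma elem_eq (a b : Int) :
    ((if a ≤ b then ((b - a : Int), a, b) else (a - b, b, a)) : Int × Int × Int)
      = (|b - a|, min a b, max a b) := by
  split_ifs with h
  · rw [abs_of_nonneg (by omega), min_eq_left h, max_eq_right h]
  · rw [abs_of_neg (by omega), neg_sub, min_eq_right (by omega), max_eq_left (by omega)]

lemma map_key5_gen5 (g : List (List Int)) (n : Int) :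
    (gen5 g n).map key5 = gen3 g n := by
  simp [gen5, gen3, List.map_flatMap, List.map_map, Function.comp_def, key5, elem_eq]

lemma map_key5_insertBy (x : Int × Int × Int × Int × Int)
    (l : List (Int × Int × Int × Int × Int)) :
    (PySem.List.insertBy before5 x l).map key5 = insertSorted (key5 x) (l.map key5) := by
  induction l with
  | nil => rfl
  | cons y ys ih =>
      simp only [PySem.List.insertBy, before5]
      split <;> rename_i hsp <;> simp [insertSorted, hsp, ih]

lemma map_key5_sort5_aux (L acc : List (Int × Int × Int × Int × Int)) :
    (L.foldl (fun acc x => PySem.List.insertBy before5 x acc) acc).map key5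
      = (L.map key5).foldl (fun a x => insertSorted x a) (acc.map key5) := by
  induction L generalizing acc with
  | nil => rfl
  | cons x L ih => simp only [List.foldl_cons, List.map_cons, ih, map_key5_insertBy]

lemma map_key5_sort5 (X : List (Int × Int × Int × Int × Int)) :
    (sort5 X).map key5 = sortOf (X.map key5) :=
  map_key5_sort5_aux X []

lemma sortOf_length_aux (L acc : List (Int × Int × Int)) :
    (L.foldl (fun a x => insertSorted x a) acc).length = acc.length + L.length := by
  induction L generalizing acc with
  | nil => simp
  | cons x L ih => simp [ih, insertSorted_length]; omega

lemma sort5_length (X : List (Int × Int × Int × Int × Int)) :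
    (sort5 X).length = X.length := by
  have h := congrArg List.length (map_key5_sort5 X)
  simpa [sortOf, sortOf_length_aux] using h

lemma pyGetD_append_left (g : List (List Int)) (x : List Int) {i : Int}
    (h0 : 0 ≤ i) (h1 : i < (g.length : Int)) :
    PySem.List.pyGetD (g ++ [x]) i [] = PySem.List.pyGetD g i [] := by
  rw [PySem.List.pyGetD_eq_getElem _ _ h0 (by simp; omega),
      PySem.List.pyGetD_eq_getElem _ _ h0 h1]
  exact List.getElem_append_left (by omega)

lemma cpc_append (g : List (List Int)) (x : List Int) :
    crossPairCount (g ++ [x])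
      = crossPairCount g + (g.map (fun gi => gi.length * x.length)).sum := by
  induction g with
  | nil => simp [crossPairCount]
  | cons h t ih => simp [crossPairCount, ih]; omega

lemma gen5_length_key (G : List (List Int)) (M : Int) :
    (gen5 G M).length
      = ((PySem.List.pyRange 0 M).map (fun i =>
          ((PySem.List.pyRange (i + 1) M).map (fun j =>
            (PySem.List.pyGetD G i []).length * (PySem.List.pyGetD G j []).length)).sum)).sum := by
  simp [gen5, List.length_flatMap]

lemma gen5_length (g : List (List Int)) :
    (gen5 g (g.length : Int)).length = crossPairCount g := by
  induction g using List.reverseRecOn with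
  | nil => rfl
  | append_singleton g x ih =>
      have hN0 : (0 : Int) ≤ (g.length : Int) := Int.natCast_nonneg _
      have hNc : (((g ++ [x]).length : Nat) : Int) = (g.length : Int) + 1 := by
        simp
      rw [gen5_length_key, hNc,
          PySem.List.pyRange_one_succ_right hN0, List.map_append, List.sum_append]
      have hlastchunk :
          ([((g.length : Nat) : Int)].map (fun i =>
            ((PySem.List.pyRange (i + 1) ((g.length : Int) + 1)).map (fun j =>
              (PySem.List.pyGetD (g ++ [x]) i []).length *
              (PySem.List.pyGetD (g ++ [x]) j []).length)).sum)).sum = 0 := by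
        simp
      rw [hlastchunk]
      have hmain : ∀ i ∈ PySem.List.pyRange 0 (g.length : Int),
          ((PySem.List.pyRange (i + 1) ((g.length : Int) + 1)).map (fun j =>
            (PySem.List.pyGetD (g ++ [x]) i []).length *
            (PySem.List.pyGetD (g ++ [x]) j []).length)).sum
          = ((PySem.List.pyRange (i + 1) (g.length : Int)).map (fun j =>
              (PySem.List.pyGetD g i []).length * (PySem.List.pyGetD g j []).length)).sum
            + (PySem.List.pyGetD g i []).length * x.length := by
        intro i hi
        obtain ⟨hi0, hi1⟩ := PySem.List.mem_pyRange_one.mp hi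
        rw [PySem.List.pyRange_one_succ_right (by omega), List.map_append, List.sum_append]
        rw [pyGetD_append_left g x hi0 hi1]
        congr 1
        · apply congrArg
          apply List.map_congr_left
          intro j hj
          obtain ⟨hj0, hj1⟩ := PySem.List.mem_pyRange_one.mp hj
          rw [pyGetD_append_left g x (by omega) hj1]
        · simp
      rw [List.map_congr_left hmain, List.sum_map_add]
      have hsum2 : ((PySem.List.pyRange 0 (g.length : Int)).map (fun i =>
          (PySem.List.pyGetD g i []).length * x.length)).sum
          = (g.map (fun gi => gi.length * x.length)).sum := by
        have h2 : ((PySem.List.pyRange 0 (g.length : Int)).map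
            (fun j => PySem.List.pyGetD g j ([] : List Int))) = g :=
          PySem.List.map_pyGetD_pyRange_zero g ([] : List Int)
        calc ((PySem.List.pyRange 0 (g.length : Int)).map (fun i =>
                (PySem.List.pyGetD g i []).length * x.length)).sum
            = (((PySem.List.pyRange 0 (g.length : Int)).map
                (fun j => PySem.List.pyGetD g j [])).map
                  (fun gi => gi.length * x.length)).sum := by simp [List.map_map, Function.comp_def]
          _ = (g.map (fun gi => gi.length * x.length)).sum := by rw [h2]
      rw [hsum2, ← gen5_length_key, ih, cpc_append]
      omega

-- the two merge helpers agree
def stepA (merged : List (Int × Int)) (cur : Int × Int) : List (Int × Int) :=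
  let last := merged.getLast?.getD (0, 0)
  if cur.1 ≤ last.2 + 1 then merged.dropLast ++ [(last.1, max last.2 cur.2)] else merged ++ [cur]

def stepB (acc : List (Int × Int)) (cur : Int × Int) : List (Int × Int) :=
  match acc with
  | [] => [cur]
  | (ls, le) :: tl =>
      if cur.1 ≤ le + 1 then (ls, if le < cur.2 then cur.2 else le) :: tl
      else cur :: (ls, le) :: tl

lemma stepB_ne_nil (acc : List (Int × Int)) (cur : Int × Int) : stepB acc cur ≠ [] := by
  unfold stepB
  cases acc with
  | nil => simp
  | cons hd tl => obtain ⟨ls, le⟩ := hd; dsimp only; split <;> simp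

lemma step_rev (tl : List (Int × Int)) (ls le : Int) (cur : Int × Int) :
    stepA (((ls, le) :: tl).reverse) cur = (stepB ((ls, le) :: tl) cur).reverse := by
  unfold stepA stepB
  rw [List.reverse_cons]
  simp only [List.getLast?_concat, Option.getD_some, List.dropLast_concat]
  by_cases hc : cur.1 ≤ le + 1
  · rw [if_pos hc, if_pos hc, List.reverse_cons]
    have : max le cur.2 = if le < cur.2 then cur.2 else le := by
      split_ifs with h
      · exact max_eq_right h.le
      · exact max_eq_left (by omega)
    rw [this]
  · rw [if_neg hc, if_neg hc]
    simp [List.reverse_cons]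

lemma merge_fold_eq (rest : List (Int × Int)) (accB : List (Int × Int)) (h : accB ≠ []) :
    rest.foldl stepA accB.reverse = (rest.foldl stepB accB).reverse := by
  induction rest generalizing accB with
  | nil => rfl
  | cons cur rest ih =>
      cases accB with
      | nil => exact absurd rfl h
      | cons hd tl =>
          obtain ⟨ls, le⟩ := hd
          rw [List.foldl_cons, List.foldl_cons, step_rev]
          exact ih _ (stepB_ne_nil _ _)

lemma merge_eq (r : List (Int × Int)) : mergeOverlappingRanges r = mergeRangesRev r := by
  by_cases hr : r = []
  · subst hr; rfl
  · unfold mergeOverlappingRanges mergeRangesRev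
    rw [if_neg hr]
    have hperm := PySem.List.sorted2_perm r (fun x => x.1) (fun x => x.2) false
    cases hsr : PySem.List.sorted2 r (fun x => x.1) (fun x => x.2) with
    | nil =>
        rw [hsr] at hperm
        exact absurd hperm.symm.eq_nil hr
    | cons first rest =>
        rw [List.foldl_cons]
        exact merge_fold_eq rest [first] (by simp)

lemma foldB_ne_nil (rest : List (Int × Int)) (acc : List (Int × Int)) (h : acc ≠ []) :
    rest.foldl stepB acc ≠ [] := by
  induction rest generalizing acc with
  | nil => exact h
  | cons cur rest ih => rw [List.foldl_cons]; exact ih _ (stepB_ne_nil _ _)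

lemma mergeRangesRev_ne_nil (r : List (Int × Int)) (hr : r ≠ []) : mergeRangesRev r ≠ [] := by
  unfold mergeRangesRev
  have hperm := PySem.List.sorted2_perm r (fun x => x.1) (fun x => x.2) false
  cases hsr : PySem.List.sorted2 r (fun x => x.1) (fun x => x.2) with
  | nil => rw [hsr] at hperm; exact absurd hperm.symm.eq_nil hr
  | cons first rest =>
      rw [List.foldl_cons]
      intro hcon
      exact foldB_ne_nil rest (stepB [] first) (stepB_ne_nil [] first)
        (by rwa [List.reverse_eq_nil_iff] at hcon)

-- ===== VERDICT (by name: the statement is the Claim_ definition above) =====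
theorem select_topk_closest_line_pairs_spec : Claim_unchanged_select_topk_closest_line_pairs := by
  intro g topk _dom
  unfold Spec_select_topk_closest_line_pairs
  intro hnd
  unfold select_topk_closest_line_pairs select_topk_closest_line_pairs_alt
  by_cases hlen : g.length < 2
  · rw [if_pos hlen, if_pos hlen]
  · rw [if_neg hlen, if_neg hlen]
    simp only [distances_eq, buf_eq, foldl_topkStep]
    show mergeOverlappingRanges
        ((PySem.List.slice (sort5 (gen5 g (g.length : Int))) none (some topk)).map proj5)
      = mergeRangesRev (((sortOf (gen3 g (g.length : Int))).take topk.toNat).map proj3)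
    rw [merge_eq]
    congr 1
    rw [← map_key5_gen5, ← map_key5_sort5]
    by_cases hk : 0 ≤ topk
    · -- topk ≥ 0: the slice is a take
      have hcast : topk = ((topk.toNat : Nat) : Int) := (Int.toNat_of_nonneg hk).symm
      rw [hcast, PySem.List.slice_to_natCast, Int.toNat_natCast,
        ← List.map_take, List.map_map]
      rfl
    · -- topk < 0 and ¬D: both sides are []
      have hkk : topk = -(((-topk).toNat : Nat) : Int) := by omega
      rw [hkk, PySem.List.slice_to_neg_natCast _ _ (by omega)]
      have hlen5 : (sort5 (gen5 g (g.length : Int))).length = crossPairCount g := by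
        rw [sort5_length, gen5_length]
      have hcpc : crossPairCount g ≤ (-topk).toNat := by
        by_contra hcon
        exact hnd ⟨by omega, by omega, by omega⟩
      have h0 : (-(((-topk).toNat : Nat) : Int)).toNat = 0 := by omega
      rw [hlen5, h0, Nat.sub_eq_zero_of_le hcpc]
      simp

theorem select_topk_closest_line_pairs_changed : Claim_changed_select_topk_closest_line_pairs := by
  unfold Claim_changed_select_topk_closest_line_pairs; decide

theorem select_topk_closest_line_pairs_tight : Claim_exact_select_topk_closest_line_pairs := by
  intro g topk _dom hD
  obtain ⟨hk, hlen2, hcpc⟩ := hD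
  have hlen : ¬ g.length < 2 := by omega
  have hB : select_topk_closest_line_pairs_alt g topk = [] := by
    unfold select_topk_closest_line_pairs_alt
    rw [if_neg hlen]
    simp only [buf_eq, foldl_topkStep]
    show mergeRangesRev (((sortOf (gen3 g (g.length : Int))).take topk.toNat).map proj3) = []
    have h0 : topk.toNat = 0 := by omega
    rw [h0]
    rfl
  rw [hB]
  unfold select_topk_closest_line_pairs
  rw [if_neg hlen]
  simp only [distances_eq]
  show mergeOverlappingRanges
      ((PySem.List.slice (sort5 (gen5 g (g.length : Int))) none (some topk)).map proj5) ≠ []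
  rw [merge_eq]
  apply mergeRangesRev_ne_nil
  have hkk : topk = -(((-topk).toNat : Nat) : Int) := by omega
  rw [hkk, PySem.List.slice_to_neg_natCast _ _ (by omega)]
  have hlen5 : (sort5 (gen5 g (g.length : Int))).length = crossPairCount g := by
    rw [sort5_length, gen5_length]
  intro hcon
  rw [List.map_eq_nil_iff, List.take_eq_nil_iff] at hcon
  rcases hcon with hcon | hcon
  · omega
  · rw [← List.length_eq_zero_iff, hlen5] at hcon; omega
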